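-- pv_equiv track=rewrite | github.com/jianlufu121/FreeLesion | ALR.py | select_components
-- ===== SOURCE A (Python) =====
-- def select_components(components, num_pixels):
--     selected_pixels = []
--     for component in components:
--         if len(selected_pixels) + len(component) <= num_pixels:
--             selected_pixels.extend(component)
--         else:
--             remaining_pixels = num_pixels - len(selected_pixels)
--             if remaining_pixels > 0:
--                 selected_pixels.extend(component[:remaining_pixels])
--             break
--     return selected_pixels
-- ===== SOURCE B (Python) =====
-- def select_components(components, num_pixels):
--     result = []
--     for component in components:
--         for pixel in component:
--             if len(result) >= num_pixels:
--                 return result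
--             result.append(pixel)
--     return result
-- ===== Notes on version B (the rewrite author's own statement) =====
-- stated objective: simpler
-- what changed: Replaces component-level length arithmetic, capacity branch and partial slice with a single pixel-level loop that early-returns once the limit is reached.
import Mathlib
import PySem

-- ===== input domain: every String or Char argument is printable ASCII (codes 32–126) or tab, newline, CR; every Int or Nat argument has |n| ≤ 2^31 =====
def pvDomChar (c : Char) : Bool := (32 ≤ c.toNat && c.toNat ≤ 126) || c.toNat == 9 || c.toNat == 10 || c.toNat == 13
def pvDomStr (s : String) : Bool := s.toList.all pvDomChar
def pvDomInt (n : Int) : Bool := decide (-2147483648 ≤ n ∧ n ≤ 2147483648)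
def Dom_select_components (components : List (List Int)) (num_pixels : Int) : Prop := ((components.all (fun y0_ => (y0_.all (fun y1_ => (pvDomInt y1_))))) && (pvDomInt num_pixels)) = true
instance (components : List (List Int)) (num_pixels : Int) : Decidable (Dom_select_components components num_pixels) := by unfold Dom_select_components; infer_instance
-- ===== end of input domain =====

-- B replaces A's component-level length arithmetic, capacity branch and partial slice by a
-- single pixel-level loop with an early return at the limit (objective: simpler).

-- ===== PORT A =====
-- A's loop over components with the accumulator selected_pixels; the break becomes stopping the recursion.
def pvGoA (num_pixels : Int) (sel : List Int) : List (List Int) → List Int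
  | [] => sel
  | component :: rest =>
      if (sel.length : Int) + (component.length : Int) ≤ num_pixels then
        pvGoA num_pixels (sel ++ component) rest
      else
        let remaining : Int := num_pixels - (sel.length : Int)
        if remaining > 0 then sel ++ PySem.List.slice component none (some remaining)
        else sel

def select_components (components : List (List Int)) (num_pixels : Int) : List Int :=
  pvGoA num_pixels [] components

-- ===== PORT B =====
-- inner pixel loop: .inl r = early `return r` out of the function, .inr r = fall through to next component
def pvGoPix (num_pixels : Int) : List Int → List Int → List Int ⊕ List Int
  | [], res => .inr res
  | pixel :: rest, res =>
      if (res.length : Int) ≥ num_pixels then .inl res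
      else pvGoPix num_pixels rest (res ++ [pixel])

def pvGoB (num_pixels : Int) : List (List Int) → List Int → List Int
  | [], res => res
  | component :: rest, res =>
      match pvGoPix num_pixels component res with
      | .inl r => r
      | .inr r => pvGoB num_pixels rest r

def select_components_alt (components : List (List Int)) (num_pixels : Int) : List Int :=
  pvGoB num_pixels components []

-- ===== PRECONDITION & SPEC =====
def Spec_select_components (components : List (List Int)) (num_pixels : Int) (out : List Int) : Prop := out = select_components_alt components num_pixels
instance (components : List (List Int)) (num_pixels : Int) (out : List Int) : Decidable (Spec_select_components components num_pixels out) := by unfold Spec_select_components; infer_instance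

-- ===== CLAIM (what is proved, stated in full; the proofs are below) =====
def Claim_equal_select_components : Prop := ∀ (components : List (List Int)) (num_pixels : Int), Dom_select_components components num_pixels → Spec_select_components components num_pixels (select_components components num_pixels)

-- ===== LEMMAS AND PROOFS =====

-- Both loops compute res ++ (first (n - |res|)⁺ pixels of the flattened remaining components).

theorem pvGoA_spec (n : Int) (cs : List (List Int)) : ∀ sel : List Int,
    pvGoA n sel cs = sel ++ cs.flatten.take (n - (sel.length : Int)).toNat := by
  induction cs with
  | nil => intro sel; simp [pvGoA]
  | cons c rest ih =>
    intro sel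
    simp only [pvGoA]
    split_ifs with h1 h2
    · rw [ih]
      have hcl : (c.length : Int) ≤ n - (sel.length : Int) := by omega
      have htn : (n - (sel.length : Int)).toNat = c.length + (n - ((sel ++ c).length : Int)).toNat := by
        simp only [List.length_append]; omega
      simp only [List.flatten_cons, htn, List.take_append, List.append_assoc,
        Nat.add_sub_cancel_left, List.take_of_length_le (Nat.le_add_right _ _)]
    · -- remaining > 0, remaining < c.length
      have h0 : (0:Int) ≤ n - (sel.length : Int) := by omega
      obtain ⟨b, hb⟩ : ∃ b : ℕ, n - (sel.length : Int) = (b : Int) := ⟨(n - sel.length).toNat, by omega⟩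
      have hblt : b ≤ c.length := by omega
      rw [show n - (sel.length : Int) = ((b : Nat) : Int) from hb]
      rw [PySem.List.slice_to_natCast]
      simp only [List.flatten_cons, Int.toNat_natCast]
      rw [List.take_append_of_le_length (by omega)]
    · -- remaining ≤ 0
      have : (n - (sel.length : Int)).toNat = 0 := by omega
      simp [this]

theorem pvGoPix_spec (n : Int) (c : List Int) : ∀ res : List Int,
    (match pvGoPix n c res with | .inl r => r | .inr r => r)
      = res ++ c.take (n - (res.length : Int)).toNat := by
  induction c with
  | nil => intro res; simp [pvGoPix]
  | cons p rest ih =>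
    intro res
    simp only [pvGoPix]
    split_ifs with h
    · have : (n - (res.length : Int)).toNat = 0 := by omega
      simp [this]
    · rw [ih]
      have : (n - (res.length : Int)).toNat = (n - ((res ++ [p]).length : Int)).toNat + 1 := by
        simp only [List.length_append, List.length_cons, List.length_nil]; omega
      simp [this, List.take_succ_cons]

theorem pvGoPix_inl_len (n : Int) (c : List Int) : ∀ res r : List Int,
    pvGoPix n c res = .inl r → (n : Int) ≤ (r.length : Int) := by
  induction c with
  | nil => intro res r h; simp [pvGoPix] at h
  | cons p rest ih =>
    intro res r h
    simp only [pvGoPix] at h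
    split_ifs at h with hc
    · cases h; omega
    · exact ih _ _ h

theorem pvGoB_spec (n : Int) (cs : List (List Int)) : ∀ res : List Int,
    pvGoB n cs res = res ++ cs.flatten.take (n - (res.length : Int)).toNat := by
  induction cs with
  | nil => intro res; simp [pvGoB]
  | cons c rest ih =>
    intro res
    simp only [pvGoB, List.flatten_cons]
    cases hpix : pvGoPix n c res with
    | inl r =>
      have hval := pvGoPix_spec n c res
      rw [hpix] at hval
      have hlen := pvGoPix_inl_len n c res r hpix
      -- cap reached: r already long enough, the take of the rest is nothing past r
      dsimp only at hval
      show r = _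
      rw [hval]
      have hk : (n - (res.length : Int)).toNat ≤ c.length := by
        by_contra hgt
        push_neg at hgt
        have := congrArg List.length hval
        simp only [List.length_append, List.length_take] at this
        omega
      rw [List.take_append_of_le_length hk]
    | inr r =>
      have hval := pvGoPix_spec n c res
      rw [hpix] at hval
      dsimp only at hval
      show pvGoB n rest r = _
      rw [ih, hval]
      -- inr means the guard never fired: the take consumed all of c
      have hc : c.length ≤ (n - (res.length : Int)).toNat := by
        clear hval ih
        induction c generalizing res with
        | nil => simp
        | cons p cr ihc =>
          simp only [pvGoPix] at hpix
          split_ifs at hpix with hg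
          · have h2 := ihc _ hpix
            simp only [List.length_append, List.length_cons, List.length_nil] at h2
            simp only [List.length_cons]
            omega
      have htake : List.take (n - (res.length : Int)).toNat c = c :=
        List.take_of_length_le hc
      rw [htake, List.take_append, htake, List.append_assoc]
      congr 2
      simp only [List.length_append]
      congr 1
      push_cast
      omega

-- ===== VERDICT (by name: the statement is the Claim_ definition above) =====
theorem select_components_spec : Claim_equal_select_components := by
  intro components num_pixels _
  unfold Spec_select_components select_components select_components_alt
  rw [pvGoA_spec, pvGoB_spec]
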